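-- pv_equiv track=rewrite | github.com/LinaWhite15/HW4_Functions2 | mol_weight.py | protein_mass
-- ===== SOURCE A (Python) =====
-- def protein_mass(seq: str):
--     "Counts molecular weight of the protein"
--     count = 0
--     for amino in seq:
--         if amino == "A":
--             count += 89
--         elif amino == "R":
--             count += 174
--         elif amino == "N":
--             count += 132
--         elif amino == "V":
--             count += 117
--         elif amino == "H":
--             count += 155
--         elif amino == "G":
--             count += 75
--         elif amino == "Q":
--             count += 146
--         elif amino == "E":
--             count += 147
--         elif amino == "I":
--             count += 131
--         elif amino == "L":
--             count += 131
--         elif amino == "K":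
--             count += 146
--         elif amino == "M":
--             count += 149
--         elif amino == "P":
--             count += 115
--         elif amino == "S":
--             count += 105
--         elif amino == "Y":
--             count += 181
--         elif amino == "T":
--             count += 119
--         elif amino == "W":
--             count += 204
--         elif amino == "F":
--             count += 165
--         else:
--             count += 133
--     return count
-- ===== SOURCE B (Python) =====
-- _WEIGHTS = {"A": 89, "R": 174, "N": 132, "V": 117, "H": 155, "G": 75,
--             "Q": 146, "E": 147, "I": 131, "L": 131, "K": 146, "M": 149,
--             "P": 115, "S": 105, "Y": 181, "T": 119, "W": 204, "F": 165}
--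
--
-- def protein_mass(seq: str):
--     "Counts molecular weight of the protein"
--     freq = {}
--     for amino in seq:
--         freq[amino] = freq.get(amino, 0) + 1
--     total = 0
--     for amino, n in freq.items():
--         total += n * _WEIGHTS.get(amino, 133)
--     return total
-- ===== Notes on version B (the rewrite author's own statement) =====
-- stated objective: faster
-- what changed: Replaces the per-character elif-chain accumulation with a two-pass count-then-dot-product: build a frequency dict of the sequence, then sum count * weight over the distinct residues using a weight table with default 133.
import Mathlib
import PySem

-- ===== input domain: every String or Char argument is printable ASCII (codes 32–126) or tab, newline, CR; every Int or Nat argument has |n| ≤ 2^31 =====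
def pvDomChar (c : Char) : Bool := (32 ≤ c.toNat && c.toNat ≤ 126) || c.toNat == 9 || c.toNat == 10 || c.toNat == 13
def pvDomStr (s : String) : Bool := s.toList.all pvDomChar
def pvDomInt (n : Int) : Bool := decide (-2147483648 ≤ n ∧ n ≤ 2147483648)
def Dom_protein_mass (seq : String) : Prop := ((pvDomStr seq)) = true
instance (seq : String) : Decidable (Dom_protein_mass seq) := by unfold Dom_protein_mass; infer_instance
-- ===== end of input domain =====

-- B replaces A's per-character elif-chain scan with a frequency-dict pass followed by a
-- count-times-weight sum over the distinct residues (same results, alternative decomposition).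

-- ===== PORT A =====
-- the elif chain of A, one branch per residue, else 133
def pvWA (amino : Char) : Int :=
  if amino = 'A' then 89
  else if amino = 'R' then 174
  else if amino = 'N' then 132
  else if amino = 'V' then 117
  else if amino = 'H' then 155
  else if amino = 'G' then 75
  else if amino = 'Q' then 146
  else if amino = 'E' then 147
  else if amino = 'I' then 131
  else if amino = 'L' then 131
  else if amino = 'K' then 146
  else if amino = 'M' then 149
  else if amino = 'P' then 115
  else if amino = 'S' then 105
  else if amino = 'Y' then 181
  else if amino = 'T' then 119
  else if amino = 'W' then 204
  else if amino = 'F' then 165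
  else 133

def protein_mass (seq : String) : Int :=
  seq.toList.foldl (fun count amino => count + pvWA amino) 0

-- ===== PORT B =====
-- the module-level weight dict of Source B
def pvWeights : PySem.Dict Char Int :=
  PySem.Dict.ofList [('A', 89), ('R', 174), ('N', 132), ('V', 117), ('H', 155), ('G', 75),
                     ('Q', 146), ('E', 147), ('I', 131), ('L', 131), ('K', 146), ('M', 149),
                     ('P', 115), ('S', 105), ('Y', 181), ('T', 119), ('W', 204), ('F', 165)]

def protein_mass_alt (seq : String) : Int :=
  let freq := seq.toList.foldl (fun d amino => d.insert amino (d.getD amino 0 + 1)) PySem.Dict.empty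
  freq.items.foldl (fun total p => total + p.2 * pvWeights.getD p.1 133) 0

-- ===== PRECONDITION & SPEC =====
def Spec_protein_mass (seq : String) (out : Int) : Prop := out = protein_mass_alt seq
instance (seq : String) (out : Int) : Decidable (Spec_protein_mass seq out) := by unfold Spec_protein_mass; infer_instance

-- ===== CLAIM (what is proved, stated in full; the proofs are below) =====
def Claim_equal_protein_mass : Prop := ∀ (seq : String), Dom_protein_mass seq → Spec_protein_mass seq (protein_mass seq)

-- ===== LEMMAS AND PROOFS =====

-- the dict lookup with default 133 computes exactly A's elif chain
set_option maxHeartbeats 1000000 in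
lemma pvWeights_getD_eq (c : Char) : pvWeights.getD c 133 = pvWA c := by
  have h : pvWeights = PySem.Dict.mk
      [('A', 89), ('R', 174), ('N', 132), ('V', 117), ('H', 155), ('G', 75),
       ('Q', 146), ('E', 147), ('I', 131), ('L', 131), ('K', 146), ('M', 149),
       ('P', 115), ('S', 105), ('Y', 181), ('T', 119), ('W', 204), ('F', 165)] := by decide
  rw [h]
  simp only [pvWA, PySem.Dict.getD, PySem.Dict.get?_mk_cons]
  by_cases h0 : c = 'A'
  · subst h0; decide
  rw [if_neg h0, if_neg (by simp [Ne.symm h0] : ¬ (('A' == c) = true))]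
  by_cases h1 : c = 'R'
  · subst h1; decide
  rw [if_neg h1, if_neg (by simp [Ne.symm h1] : ¬ (('R' == c) = true))]
  by_cases h2 : c = 'N'
  · subst h2; decide
  rw [if_neg h2, if_neg (by simp [Ne.symm h2] : ¬ (('N' == c) = true))]
  by_cases h3 : c = 'V'
  · subst h3; decide
  rw [if_neg h3, if_neg (by simp [Ne.symm h3] : ¬ (('V' == c) = true))]
  by_cases h4 : c = 'H'
  · subst h4; decide
  rw [if_neg h4, if_neg (by simp [Ne.symm h4] : ¬ (('H' == c) = true))]
  by_cases h5 : c = 'G'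
  · subst h5; decide
  rw [if_neg h5, if_neg (by simp [Ne.symm h5] : ¬ (('G' == c) = true))]
  by_cases h6 : c = 'Q'
  · subst h6; decide
  rw [if_neg h6, if_neg (by simp [Ne.symm h6] : ¬ (('Q' == c) = true))]
  by_cases h7 : c = 'E'
  · subst h7; decide
  rw [if_neg h7, if_neg (by simp [Ne.symm h7] : ¬ (('E' == c) = true))]
  by_cases h8 : c = 'I'
  · subst h8; decide
  rw [if_neg h8, if_neg (by simp [Ne.symm h8] : ¬ (('I' == c) = true))]
  by_cases h9 : c = 'L'
  · subst h9; decide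
  rw [if_neg h9, if_neg (by simp [Ne.symm h9] : ¬ (('L' == c) = true))]
  by_cases h10 : c = 'K'
  · subst h10; decide
  rw [if_neg h10, if_neg (by simp [Ne.symm h10] : ¬ (('K' == c) = true))]
  by_cases h11 : c = 'M'
  · subst h11; decide
  rw [if_neg h11, if_neg (by simp [Ne.symm h11] : ¬ (('M' == c) = true))]
  by_cases h12 : c = 'P'
  · subst h12; decide
  rw [if_neg h12, if_neg (by simp [Ne.symm h12] : ¬ (('P' == c) = true))]
  by_cases h13 : c = 'S'
  · subst h13; decide
  rw [if_neg h13, if_neg (by simp [Ne.symm h13] : ¬ (('S' == c) = true))]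
  by_cases h14 : c = 'Y'
  · subst h14; decide
  rw [if_neg h14, if_neg (by simp [Ne.symm h14] : ¬ (('Y' == c) = true))]
  by_cases h15 : c = 'T'
  · subst h15; decide
  rw [if_neg h15, if_neg (by simp [Ne.symm h15] : ¬ (('T' == c) = true))]
  by_cases h16 : c = 'W'
  · subst h16; decide
  rw [if_neg h16, if_neg (by simp [Ne.symm h16] : ¬ (('W' == c) = true))]
  by_cases h17 : c = 'F'
  · subst h17; decide
  rw [if_neg h17, if_neg (by simp [Ne.symm h17] : ¬ (('F' == c) = true))]
  rfl

lemma sum_indicator_of_nodup (w : Char → Int) (x : Char) :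
    ∀ (S : List Char), S.Nodup → x ∈ S →
      (S.map (fun k => if x = k then w k else 0)).sum = w x := by
  intro S
  induction S with
  | nil => simp
  | cons a S ih =>
    intro hnd hx
    rcases List.nodup_cons.mp hnd with ⟨ha, hnd'⟩
    by_cases hxa : x = a
    · subst hxa
      have : (S.map (fun k => if x = k then w k else 0)).sum = 0 := by
        apply List.sum_eq_zero
        intro y hy
        rcases List.mem_map.mp hy with ⟨k, hk, rfl⟩
        have : x ≠ k := fun h => ha (h ▸ hk)
        simp [this]
      simp [this]
    · have hx' : x ∈ S := by
        rcases List.mem_cons.mp hx with h | h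
        · exact absurd h hxa
        · exact h
      simp [hxa, ih hnd' hx']

lemma sum_count_weight (w : Char → Int) :
    ∀ (xs S : List Char), S.Nodup → (∀ c ∈ xs, c ∈ S) →
      (S.map (fun k => (xs.count k : Int) * w k)).sum = (xs.map w).sum := by
  intro xs
  induction xs with
  | nil => intro S _ _; simp
  | cons x xs ih =>
    intro S hnd hsub
    have hxS : x ∈ S := hsub x (by simp)
    have hsub' : ∀ c ∈ xs, c ∈ S := fun c hc => hsub c (List.mem_cons_of_mem _ hc)
    have hsplit :
        (S.map (fun k => ((x :: xs).count k : Int) * w k)).sum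
          = (S.map (fun k => (xs.count k : Int) * w k)).sum
            + (S.map (fun k => if x = k then w k else 0)).sum := by
      rw [← List.sum_map_add]
      apply congrArg
      apply List.map_congr_left
      intro k _
      rw [List.count_cons]
      by_cases hk : x = k
      · subst hk
        simp
        ring
      · simp [hk]
    rw [hsplit, ih S hnd hsub', sum_indicator_of_nodup w x S hnd hxS]
    simp [add_comm]

-- ===== VERDICT (by name: the statement is the Claim_ definition above) =====
theorem protein_mass_spec : Claim_equal_protein_mass := by
  intro seq _
  unfold Spec_protein_mass
  dsimp only [protein_mass, protein_mass_alt]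
  set xs := seq.toList with hxs
  rw [PySem.Dict.foldl_insert_getD_add_one_eq_counter]
  rw [PySem.Dict.items_counter]
  rw [PySem.List.foldl_add (g := fun c => pvWA c)]
  rw [PySem.List.foldl_add (g := fun p : Char × Int => p.2 * pvWeights.getD p.1 133)]
  simp only [List.map_map, zero_add]
  have : ((PySem.Set.ofList xs).map
      ((fun p : Char × Int => p.2 * pvWeights.getD p.1 133) ∘ fun k => (k, (xs.count k : Int)))).sum
      = ((PySem.Set.ofList xs).map (fun k => (xs.count k : Int) * pvWA k)).sum := by
    apply congrArg
    apply List.map_congr_left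
    intro k _
    simp [Function.comp, pvWeights_getD_eq]
  rw [this]
  exact (sum_count_weight pvWA xs (PySem.Set.ofList xs) (PySem.Set.nodup_ofList xs)
    (fun c hc => (PySem.Set.mem_ofList xs c).mpr hc)).symm
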